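-- pv_equiv track=rewrite | github.com/AutoTreeGen/TreeGen | packages/inference-engine/src/inference_engine/detectors/full_pipeline_sealed_set.py | _ordered_flags
-- ===== SOURCE A (Python) =====
-- FLAG_DNA_PARENTAGE = "dna_vs_tree_parentage_contradiction"
--
-- FLAG_ADOPTION_AS_PARENT = "adoption_foster_guardian_as_parent"
--
-- FLAG_FICTIONAL_BRIDGE = "fictional_bridge_person"
--
-- FLAG_RABBINICAL_BRIDGE = "rabbinical_famous_line_bridge"
--
-- FLAG_OLD_NAME_WRONG_PERIOD = "old_name_used_for_wrong_period"
--
-- FLAG_MODERN_COUNTRY_PRE1917 = "modern_country_for_pre1917_record"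
--
-- FLAG_MULTI_PATH_REQUIRED = "multi_path_relationship_required"
--
-- FLAG_TINY_DNA_FAMOUS = "tiny_dna_match_used_for_medieval_descent"
--
-- FLAG_COMPOUND_CONTAMINATION = "compound_public_tree_contamination"
--
-- FLAG_SEALED_BIO_PARENT = "sealed_set_biological_parentage_candidate"
--
-- FLAG_SEALED_CONFIRMED_BRANCH = "sealed_set_confirmed_branch_candidate"
--
-- def _ordered_flags(flags: set[str]) -> list[str]:
--     order = [
--         FLAG_DNA_PARENTAGE,
--         FLAG_ADOPTION_AS_PARENT,
--         FLAG_FICTIONAL_BRIDGE,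
--         FLAG_RABBINICAL_BRIDGE,
--         FLAG_OLD_NAME_WRONG_PERIOD,
--         FLAG_MODERN_COUNTRY_PRE1917,
--         FLAG_MULTI_PATH_REQUIRED,
--         FLAG_TINY_DNA_FAMOUS,
--         FLAG_COMPOUND_CONTAMINATION,
--         FLAG_SEALED_BIO_PARENT,
--         FLAG_SEALED_CONFIRMED_BRANCH,
--     ]
--     return [flag for flag in order if flag in flags]
-- ===== SOURCE B (Python) =====
-- FLAG_DNA_PARENTAGE = "dna_vs_tree_parentage_contradiction"
-- FLAG_ADOPTION_AS_PARENT = "adoption_foster_guardian_as_parent"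
-- FLAG_FICTIONAL_BRIDGE = "fictional_bridge_person"
-- FLAG_RABBINICAL_BRIDGE = "rabbinical_famous_line_bridge"
-- FLAG_OLD_NAME_WRONG_PERIOD = "old_name_used_for_wrong_period"
-- FLAG_MODERN_COUNTRY_PRE1917 = "modern_country_for_pre1917_record"
-- FLAG_MULTI_PATH_REQUIRED = "multi_path_relationship_required"
-- FLAG_TINY_DNA_FAMOUS = "tiny_dna_match_used_for_medieval_descent"
-- FLAG_COMPOUND_CONTAMINATION = "compound_public_tree_contamination"
-- FLAG_SEALED_BIO_PARENT = "sealed_set_biological_parentage_candidate"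
-- FLAG_SEALED_CONFIRMED_BRANCH = "sealed_set_confirmed_branch_candidate"
--
-- _RANK = {
--     flag: idx
--     for idx, flag in enumerate([
--         FLAG_DNA_PARENTAGE,
--         FLAG_ADOPTION_AS_PARENT,
--         FLAG_FICTIONAL_BRIDGE,
--         FLAG_RABBINICAL_BRIDGE,
--         FLAG_OLD_NAME_WRONG_PERIOD,
--         FLAG_MODERN_COUNTRY_PRE1917,
--         FLAG_MULTI_PATH_REQUIRED,
--         FLAG_TINY_DNA_FAMOUS,
--         FLAG_COMPOUND_CONTAMINATION,
--         FLAG_SEALED_BIO_PARENT,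
--         FLAG_SEALED_CONFIRMED_BRANCH,
--     ])
-- }
--
-- def _ordered_flags(flags: set[str]) -> list[str]:
--     return sorted((f for f in flags if f in _RANK), key=_RANK.__getitem__)
-- ===== Notes on version B (the rewrite author's own statement) =====
-- stated objective: idiomatic
-- what changed: Instead of scanning the fixed 11-flag order list and testing each against the input set, B builds a flag->priority rank table once, iterates the input set keeping only known flags, and sorts them by rank.
import Mathlib
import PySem

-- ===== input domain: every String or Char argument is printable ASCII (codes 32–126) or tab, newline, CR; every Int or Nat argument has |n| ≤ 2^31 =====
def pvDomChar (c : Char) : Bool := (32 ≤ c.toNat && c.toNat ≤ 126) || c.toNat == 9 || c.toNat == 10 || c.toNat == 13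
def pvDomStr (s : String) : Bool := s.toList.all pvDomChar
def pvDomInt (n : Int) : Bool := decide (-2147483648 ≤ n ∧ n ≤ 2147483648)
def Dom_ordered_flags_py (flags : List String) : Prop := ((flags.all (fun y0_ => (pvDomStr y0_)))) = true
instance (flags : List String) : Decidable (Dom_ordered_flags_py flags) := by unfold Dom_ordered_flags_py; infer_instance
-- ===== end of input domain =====

-- B replaces A's membership scan over the fixed priority list by a rank table over the input set plus a key-sort (idiomatic restructuring; return value only, no mutation).

-- module-level flag constants (shared by both Pythons)
def FLAG_DNA_PARENTAGE : String := "dna_vs_tree_parentage_contradiction"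
def FLAG_ADOPTION_AS_PARENT : String := "adoption_foster_guardian_as_parent"
def FLAG_FICTIONAL_BRIDGE : String := "fictional_bridge_person"
def FLAG_RABBINICAL_BRIDGE : String := "rabbinical_famous_line_bridge"
def FLAG_OLD_NAME_WRONG_PERIOD : String := "old_name_used_for_wrong_period"
def FLAG_MODERN_COUNTRY_PRE1917 : String := "modern_country_for_pre1917_record"
def FLAG_MULTI_PATH_REQUIRED : String := "multi_path_relationship_required"
def FLAG_TINY_DNA_FAMOUS : String := "tiny_dna_match_used_for_medieval_descent"
def FLAG_COMPOUND_CONTAMINATION : String := "compound_public_tree_contamination"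
def FLAG_SEALED_BIO_PARENT : String := "sealed_set_biological_parentage_candidate"
def FLAG_SEALED_CONFIRMED_BRANCH : String := "sealed_set_confirmed_branch_candidate"

-- ===== PORT A =====
def ordered_flags_py (flags : List String) : List String :=
  let order : List String := [
    FLAG_DNA_PARENTAGE,
    FLAG_ADOPTION_AS_PARENT,
    FLAG_FICTIONAL_BRIDGE,
    FLAG_RABBINICAL_BRIDGE,
    FLAG_OLD_NAME_WRONG_PERIOD,
    FLAG_MODERN_COUNTRY_PRE1917,
    FLAG_MULTI_PATH_REQUIRED,
    FLAG_TINY_DNA_FAMOUS,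
    FLAG_COMPOUND_CONTAMINATION,
    FLAG_SEALED_BIO_PARENT,
    FLAG_SEALED_CONFIRMED_BRANCH]
  order.filter (fun flag => decide (flag ∈ flags))

-- ===== PORT B =====
-- module-level rank table: {flag: idx for idx, flag in enumerate([...])}
def pvRank : PySem.Dict String Int :=
  (PySem.List.enumerate [
    FLAG_DNA_PARENTAGE,
    FLAG_ADOPTION_AS_PARENT,
    FLAG_FICTIONAL_BRIDGE,
    FLAG_RABBINICAL_BRIDGE,
    FLAG_OLD_NAME_WRONG_PERIOD,
    FLAG_MODERN_COUNTRY_PRE1917,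
    FLAG_MULTI_PATH_REQUIRED,
    FLAG_TINY_DNA_FAMOUS,
    FLAG_COMPOUND_CONTAMINATION,
    FLAG_SEALED_BIO_PARENT,
    FLAG_SEALED_CONFIRMED_BRANCH] 0).foldl (fun d p => d.insert p.2 p.1) PySem.Dict.empty

def ordered_flags_py_alt (flags : List String) : List String :=
  PySem.List.sorted (flags.filter (fun f => pvRank.contains f)) (fun f => pvRank.getD f 0) false

-- ===== PRECONDITION & SPEC =====
-- flags is a Python set, so its List representation holds distinct elements; Pre_ states just that.
def Pre_ordered_flags_py (flags : List String) : Prop := flags.Nodup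
instance (flags : List String) : Decidable (Pre_ordered_flags_py flags) := by unfold Pre_ordered_flags_py; infer_instance
def pvWitness_ordered_flags_py : List String := ["fictional_bridge_person", "dna_vs_tree_parentage_contradiction", "unknown_flag"]

def Spec_ordered_flags_py (flags : List String) (out : List String) : Prop := out = ordered_flags_py_alt flags
instance (flags : List String) (out : List String) : Decidable (Spec_ordered_flags_py flags out) := by unfold Spec_ordered_flags_py; infer_instance

-- ===== CLAIM (what is proved, stated in full; the proofs are below) =====
def Claim_equal_ordered_flags_py : Prop := ∀ (flags : List String), Dom_ordered_flags_py flags → Pre_ordered_flags_py flags → Spec_ordered_flags_py flags (ordered_flags_py flags)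

-- ===== LEMMAS AND PROOFS =====

-- the order list A scans (proof-side abbreviation)
def pvOrderList : List String := [
    FLAG_DNA_PARENTAGE,
    FLAG_ADOPTION_AS_PARENT,
    FLAG_FICTIONAL_BRIDGE,
    FLAG_RABBINICAL_BRIDGE,
    FLAG_OLD_NAME_WRONG_PERIOD,
    FLAG_MODERN_COUNTRY_PRE1917,
    FLAG_MULTI_PATH_REQUIRED,
    FLAG_TINY_DNA_FAMOUS,
    FLAG_COMPOUND_CONTAMINATION,
    FLAG_SEALED_BIO_PARENT,
    FLAG_SEALED_CONFIRMED_BRANCH]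

theorem pvRank_keys : pvRank.keys = pvOrderList := by decide

theorem pvRank_contains_iff (x : String) : pvRank.contains x = true ↔ x ∈ pvOrderList := by
  rw [PySem.Dict.contains_iff_mem_keys, pvRank_keys]

theorem pvOrder_nodup : pvOrderList.Nodup := by decide

theorem pvOrder_pairwise : pvOrderList.Pairwise (fun a b => pvRank.getD a 0 < pvRank.getD b 0) := by decide

theorem ordered_flags_py_spec : Claim_equal_ordered_flags_py := by
  intro flags _ hnd
  unfold Spec_ordered_flags_py ordered_flags_py ordered_flags_py_alt
  show pvOrderList.filter (fun flag => decide (flag ∈ flags)) =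
    PySem.List.sorted (flags.filter (fun f => pvRank.contains f)) (fun f => pvRank.getD f 0) false
  refine (PySem.List.sorted_eq_of_perm_of_pairwise_lt _ _ _ ?_ ?_).symm
  · rw [List.perm_ext_iff_of_nodup (pvOrder_nodup.filter _) (hnd.filter _)]
    intro x
    simp only [List.mem_filter, decide_eq_true_eq, pvRank_contains_iff]
    tauto
  · exact pvOrder_pairwise.filter _
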